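-- pv_equiv track=rewrite | github.com/donjonsec/donjon-releases | lib/ai_engine.py | _template_query
-- ===== SOURCE A (Python) =====
-- from typing import Any, Dict, List, Optional
--
-- def _template_query(question: str, context: Optional[Dict] = None) -> str:
--     """Provide a basic response when no LLM is available."""
--     lines = [
--         "AI query engine is running in template mode (no LLM backend detected).",
--         "",
--         f"Your question: {question}",
--         "",
--     ]
--
--     if context:
--         findings = context.get('findings', [])
--         if findings:
--             lines.append(f"Context contains {len(findings)} finding(s).")
--             severities: Dict[str, int] = {}
--             for f in findings:
--                 s = f.get('severity', 'UNKNOWN')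
--                 severities[s] = severities.get(s, 0) + 1
--             lines.append("Severity breakdown:")
--             for sev in ('CRITICAL', 'HIGH', 'MEDIUM', 'LOW', 'INFO'):
--                 count = severities.get(sev, 0)
--                 if count:
--                     lines.append(f"  {sev}: {count}")
--             lines.append("")
--
--     lines.extend([
--         "To enable AI-powered answers, configure one of:",
--         "  1. Install Ollama locally with Step 3.5 Flash (air-gapped, recommended)",
--         "  2. Set STEPFUN_API_KEY for Step 3.5 Flash cloud API",
--         "  3. Set ANTHROPIC_API_KEY for Anthropic Claude",
--         "  4. Set GEMINI_API_KEY for Google Gemini (fast & free tier)",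
--         "  5. Set OPENAI_API_KEY for OpenAI GPT-4",
--     ])
--     return '\n'.join(lines)
-- ===== SOURCE B (Python) =====
-- from typing import Any, Dict, List, Optional
--
-- _ORDER = ('CRITICAL', 'HIGH', 'MEDIUM', 'LOW', 'INFO')
--
--
-- def _severity_lines(findings: List) -> List[str]:
--     """Sort the displayed severities by rank, then emit one line per run of equal ranks."""
--     ranks = sorted(_ORDER.index(s)
--                    for s in (f.get('severity', 'UNKNOWN') for f in findings)
--                    if s in _ORDER)
--     out, i, n = [], 0, len(ranks)
--     while i < n:
--         j = i + 1
--         while j < n and ranks[j] == ranks[i]: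
--             j += 1
--         out.append(f"  {_ORDER[ranks[i]]}: {j - i}")
--         i = j
--     return out
--
--
-- def _template_query(question: str, context: Optional[Dict] = None) -> str:
--     """Template response; severity breakdown by sort-then-group-runs instead of a counting dict."""
--     lines = [
--         "AI query engine is running in template mode (no LLM backend detected).",
--         "",
--         f"Your question: {question}",
--         "",
--     ]
--
--     if context:
--         findings = context.get('findings', [])
--         if findings:
--             lines.append(f"Context contains {len(findings)} finding(s).")
--             lines.append("Severity breakdown:")
--             lines.extend(_severity_lines(findings))
--             lines.append("")
--
--     lines.extend([
--         "To enable AI-powered answers, configure one of:",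
--         "  1. Install Ollama locally with Step 3.5 Flash (air-gapped, recommended)",
--         "  2. Set STEPFUN_API_KEY for Step 3.5 Flash cloud API",
--         "  3. Set ANTHROPIC_API_KEY for Anthropic Claude",
--         "  4. Set GEMINI_API_KEY for Google Gemini (fast & free tier)",
--         "  5. Set OPENAI_API_KEY for OpenAI GPT-4",
--     ])
--     return '\n'.join(lines)
-- ===== Notes on version B (the rewrite author's own statement) =====
-- stated objective: alternative
-- what changed: Replaces the build-a-severity-dict-then-read pass by sort-then-group: severities are mapped to their rank in the fixed order, the ranks are sorted, and one line is emitted per run of equal ranks, so no counting table is built or read.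
import Mathlib
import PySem

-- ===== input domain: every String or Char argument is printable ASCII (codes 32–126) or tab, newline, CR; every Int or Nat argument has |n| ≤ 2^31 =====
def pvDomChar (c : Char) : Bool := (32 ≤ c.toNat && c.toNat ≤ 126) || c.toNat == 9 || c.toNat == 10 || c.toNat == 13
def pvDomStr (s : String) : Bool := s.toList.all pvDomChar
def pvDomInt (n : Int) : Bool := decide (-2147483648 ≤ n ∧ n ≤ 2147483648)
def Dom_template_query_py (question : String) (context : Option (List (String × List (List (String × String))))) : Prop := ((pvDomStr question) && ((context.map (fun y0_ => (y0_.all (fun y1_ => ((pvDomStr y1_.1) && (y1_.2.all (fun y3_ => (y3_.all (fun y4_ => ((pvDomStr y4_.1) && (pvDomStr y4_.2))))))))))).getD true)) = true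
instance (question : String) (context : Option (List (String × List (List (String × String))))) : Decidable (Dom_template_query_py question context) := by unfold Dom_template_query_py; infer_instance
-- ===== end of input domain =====

-- B replaces A's build-a-severity-counting-dict-then-read pass by sort-then-group-runs
-- (map severities to ranks, sort, emit one line per run of equal ranks); objective: alternative.

-- shared template text and f.get('severity', 'UNKNOWN')
def pvSevOf (f : List (String × String)) : String :=
  (PySem.Dict.ofList f).getD "severity" "UNKNOWN"

def pvOrder : List String := ["CRITICAL", "HIGH", "MEDIUM", "LOW", "INFO"]

def pvHeadLines (question : String) : List String :=
  [ "AI query engine is running in template mode (no LLM backend detected).",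
    "",
    "Your question: " ++ question,
    "" ]

def pvTailLines : List String :=
  [ "To enable AI-powered answers, configure one of:",
    "  1. Install Ollama locally with Step 3.5 Flash (air-gapped, recommended)",
    "  2. Set STEPFUN_API_KEY for Step 3.5 Flash cloud API",
    "  3. Set ANTHROPIC_API_KEY for Anthropic Claude",
    "  4. Set GEMINI_API_KEY for Google Gemini (fast & free tier)",
    "  5. Set OPENAI_API_KEY for OpenAI GPT-4" ]

-- ===== PORT A =====
def template_query_py (question : String) (context : Option (List (String × List (List (String × String))))) : String :=
  let lines := pvHeadLines question
  let lines :=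
    match context with
    | none => lines
    | some ctxList =>
      if ctxList.isEmpty then lines else
        let findings := (PySem.Dict.ofList ctxList).getD "findings" []
        if findings.isEmpty then lines else
          let lines := lines ++ ["Context contains " ++ PySem.Int.toStr (findings.length : Int) ++ " finding(s)."]
          -- severities[s] = severities.get(s, 0) + 1 over all findings
          let severities : PySem.Dict String Int :=
            findings.foldl (fun d f => d.insert (pvSevOf f) (d.getD (pvSevOf f) 0 + 1)) PySem.Dict.empty
          let lines := lines ++ ["Severity breakdown:"]
          let lines := pvOrder.foldl
            (fun ls sev =>
              let count : Int := severities.getD sev 0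
              if count ≠ 0 then ls ++ ["  " ++ sev ++ ": " ++ PySem.Int.toStr count] else ls)
            lines
          lines ++ [""]
  PySem.Str.join "\n" (lines ++ pvTailLines)

-- ===== PORT B =====
-- the two-index while loops of Source B's _severity_lines, in index-free form:
-- peel the maximal run of the head rank, emit its length, continue on the remainder
def pvGroupRuns : List Nat → List (Nat × Nat)
  | [] => []
  | r :: rest =>
      (r, (rest.takeWhile (· == r)).length + 1) :: pvGroupRuns (rest.dropWhile (· == r))
termination_by l => l.length
decreasing_by
  simp only [List.length_cons]
  exact Nat.lt_succ_of_le (List.length_dropWhile_le _ _)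

-- sorted(ORDER.index(s) for s in (f.get('severity','UNKNOWN') for f in findings) if s in ORDER)
def pvRanks (findings : List (List (String × String))) : List Nat :=
  PySem.List.sorted ((findings.map pvSevOf).filterMap (fun s => PySem.List.index? pvOrder s)) (fun x => x) false

def pvSeverityLines (findings : List (List (String × String))) : List String :=
  (pvGroupRuns (pvRanks findings)).map
    (fun p => "  " ++ pvOrder.getD p.1 "" ++ ": " ++ PySem.Int.toStr (p.2 : Int))

def template_query_py_alt (question : String) (context : Option (List (String × List (List (String × String))))) : String :=
  let lines := pvHeadLines question
  let lines :=
    match context with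
    | none => lines
    | some ctxList =>
      if ctxList.isEmpty then lines else
        let findings := (PySem.Dict.ofList ctxList).getD "findings" []
        if findings.isEmpty then lines else
          lines
            ++ ["Context contains " ++ PySem.Int.toStr (findings.length : Int) ++ " finding(s)."]
            ++ ["Severity breakdown:"]
            ++ pvSeverityLines findings
            ++ [""]
  PySem.Str.join "\n" (lines ++ pvTailLines)

-- ===== PRECONDITION & SPEC =====
def Spec_template_query_py (question : String) (context : Option (List (String × List (List (String × String))))) (out : String) : Prop := out = template_query_py_alt question context
instance (question : String) (context : Option (List (String × List (List (String × String))))) (out : String) : Decidable (Spec_template_query_py question context out) := by unfold Spec_template_query_py; infer_instance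

-- ===== CLAIM (what is proved, stated in full; the proofs are below) =====
def Claim_equal_template_query_py : Prop := ∀ (question : String) (context : Option (List (String × List (List (String × String))))), Dom_template_query_py question context → Spec_template_query_py question context (template_query_py question context)

-- ===== LEMMAS AND PROOFS =====

-- A's dict counter read at sev is the plain count of sev among the severities.
theorem pvDictCount (findings : List (List (String × String))) (sev : String) :
    (findings.foldl (fun d f => d.insert (pvSevOf f) (d.getD (pvSevOf f) 0 + 1)) PySem.Dict.empty).getD sev 0
      = ((findings.map pvSevOf).count sev : Int) := by
  rw [← PySem.Dict.getD_counter (findings.map pvSevOf) sev,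
      ← PySem.Dict.foldl_insert_getD_add_one_eq_counter, List.foldl_map]

-- rank lookup, explicitly
theorem pvIdx_spec (s : String) :
    PySem.List.index? pvOrder s =
      if s = "CRITICAL" then some 0 else if s = "HIGH" then some 1
      else if s = "MEDIUM" then some 2 else if s = "LOW" then some 3
      else if s = "INFO" then some 4 else none := by
  unfold pvOrder
  split_ifs with h1 h2 h3 h4 h5 <;>
    simp [PySem.List.index?_eq_idxOf?, List.idxOf?, List.findIdx?_cons, h1] <;>
    simp_all [eq_comm]

-- the rank list counts r exactly as the severities count pvOrder[r]
theorem pvRankCount (ss : List String) (r : Nat) (hr : r < 5) :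
    (ss.filterMap (fun s => PySem.List.index? pvOrder s)).count r = ss.count (pvOrder.getD r "") := by
  rw [List.count_filterMap, List.count_eq_countP]
  apply List.countP_congr
  intro s _
  rw [pvIdx_spec]
  interval_cases r <;> split_ifs <;>
    (try subst_vars) <;> simp [beq_iff_eq] <;> first | decide | simp_all [pvOrder]

-- grouping a run-canonical list
theorem pvRun_take_drop (v k : Nat) (rest : List Nat) (h : ∀ x ∈ rest, v < x) :
    (List.replicate k v ++ rest).takeWhile (· == v) = List.replicate k v
      ∧ (List.replicate k v ++ rest).dropWhile (· == v) = rest := by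
  induction k with
  | zero =>
    cases rest with
    | nil => simp
    | cons x t =>
      have hx : (x == v) = false := by
        simp only [beq_eq_false_iff_ne]
        exact Nat.ne_of_gt (h x (by simp))
      constructor <;> simp [List.takeWhile_cons, List.dropWhile_cons, hx]
  | succ m ih =>
    constructor <;>
      simp [List.replicate_succ, List.takeWhile_cons, List.dropWhile_cons, ih.1, ih.2]

theorem pvGroupRuns_replicate_append (v c : Nat) (rest : List Nat) (h : ∀ x ∈ rest, v < x) :
    pvGroupRuns (List.replicate c v ++ rest)
      = if c = 0 then pvGroupRuns rest else (v, c) :: pvGroupRuns rest := by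
  cases c with
  | zero => simp
  | succ k =>
    simp [List.replicate_succ, pvGroupRuns, (pvRun_take_drop v k rest h).1,
      (pvRun_take_drop v k rest h).2]

-- the sorted rank list is a concatenation of replicates, one per rank
theorem pvSorted_canonical (ms : List Nat) (h5 : ∀ x ∈ ms, x < 5) :
    PySem.List.sorted ms (fun x => x) false
      = List.replicate (ms.count 0) 0 ++ (List.replicate (ms.count 1) 1
        ++ (List.replicate (ms.count 2) 2 ++ (List.replicate (ms.count 3) 3
        ++ List.replicate (ms.count 4) 4))) := by
  apply PySem.List.sorted_id_eq_of_perm_of_pairwise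
  · rw [List.perm_iff_count]
    intro x
    simp only [List.count_append, List.count_replicate]
    by_cases hx : x < 5
    · interval_cases x <;> simp
    · have : ms.count x = 0 := List.count_eq_zero_of_not_mem (fun hm => hx (h5 x hm))
      rw [this]
      split_ifs <;> (simp only [beq_iff_eq] at *) <;> (try (exfalso; omega)) <;> simp
  · simp only [List.pairwise_append, List.pairwise_replicate, List.mem_append,
      List.mem_replicate]
    refine ⟨?_, ?_, ?_⟩ <;> try (intros; omega)
    all_goals
      refine ⟨?_, ?_, ?_⟩ <;> try (intros; omega)
    all_goals
      refine ⟨?_, ?_, ?_⟩ <;> try (intros; omega)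
    all_goals
      refine ⟨?_, ?_, ?_⟩ <;> (intros; try omega)
    all_goals simp_all <;> omega

-- the two severity-section computations agree
theorem pvMiddle_eq (findings : List (List (String × String))) (ls : List String) :
    pvOrder.foldl
      (fun ls sev =>
        let count : Int :=
          (findings.foldl (fun d f => d.insert (pvSevOf f) (d.getD (pvSevOf f) 0 + 1)) PySem.Dict.empty).getD sev 0
        if count ≠ 0 then ls ++ ["  " ++ sev ++ ": " ++ PySem.Int.toStr count] else ls) ls
      = ls ++ pvSeverityLines findings := by
  have hidx5 : ∀ x ∈ (findings.map pvSevOf).filterMap (fun s => PySem.List.index? pvOrder s), x < 5 := by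
    intro x hx
    rcases List.mem_filterMap.mp hx with ⟨s, _, hs⟩
    rw [pvIdx_spec] at hs
    split_ifs at hs <;> simp_all <;> omega
  have hcanon := pvSorted_canonical ((findings.map pvSevOf).filterMap (fun s => PySem.List.index? pvOrder s)) hidx5
  set ms := (findings.map pvSevOf).filterMap (fun s => PySem.List.index? pvOrder s) with hms
  have m3 : ∀ x ∈ List.replicate (ms.count 4) 4, 3 < x := by
    intro x hx; rw [List.mem_replicate] at hx; omega
  have m2 : ∀ x ∈ List.replicate (ms.count 3) 3 ++ List.replicate (ms.count 4) 4, 2 < x := by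
    intro x hx; rcases List.mem_append.mp hx with h | h <;> rw [List.mem_replicate] at h <;> omega
  have m1 : ∀ x ∈ List.replicate (ms.count 2) 2 ++ (List.replicate (ms.count 3) 3 ++ List.replicate (ms.count 4) 4), 1 < x := by
    intro x hx
    rcases List.mem_append.mp hx with h | h
    · rw [List.mem_replicate] at h; omega
    · exact Nat.lt_trans (by omega) (m2 x h)
  have m0 : ∀ x ∈ List.replicate (ms.count 1) 1 ++ (List.replicate (ms.count 2) 2 ++ (List.replicate (ms.count 3) 3 ++ List.replicate (ms.count 4) 4)), 0 < x := by
    intro x hx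
    rcases List.mem_append.mp hx with h | h
    · rw [List.mem_replicate] at h; omega
    · exact Nat.lt_trans (by omega) (m1 x h)
  have g4 := pvGroupRuns_replicate_append 4 (ms.count 4) [] (by simp)
  have g3 := pvGroupRuns_replicate_append 3 (ms.count 3) _ m3
  have g2 := pvGroupRuns_replicate_append 2 (ms.count 2) _ m2
  have g1 := pvGroupRuns_replicate_append 1 (ms.count 1) _ m1
  have g0 := pvGroupRuns_replicate_append 0 (ms.count 0) _ m0
  have e0 : ms.count 0 = (findings.map pvSevOf).count "CRITICAL" := pvRankCount _ 0 (by omega)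
  have e1 : ms.count 1 = (findings.map pvSevOf).count "HIGH" := pvRankCount _ 1 (by omega)
  have e2 : ms.count 2 = (findings.map pvSevOf).count "MEDIUM" := pvRankCount _ 2 (by omega)
  have e3 : ms.count 3 = (findings.map pvSevOf).count "LOW" := pvRankCount _ 3 (by omega)
  have e4 : ms.count 4 = (findings.map pvSevOf).count "INFO" := pvRankCount _ 4 (by omega)
  unfold pvSeverityLines pvRanks
  rw [← hms, hcanon]
  simp only [List.append_nil] at g4
  simp only [g0, g1, g2, g3, g4]
  simp only [e0, e1, e2, e3, e4]
  simp only [pvOrder, List.foldl_cons, List.foldl_nil, pvDictCount]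
  by_cases h0 : (findings.map pvSevOf).count "CRITICAL" = 0 <;>
  by_cases h1 : (findings.map pvSevOf).count "HIGH" = 0 <;>
  by_cases h2 : (findings.map pvSevOf).count "MEDIUM" = 0 <;>
  by_cases h3 : (findings.map pvSevOf).count "LOW" = 0 <;>
  by_cases h4 : (findings.map pvSevOf).count "INFO" = 0 <;>
    simp [pvGroupRuns, h0, h1, h2, h3, h4]

-- ===== VERDICT (by name: the statement is the Claim_ definition above) =====
theorem template_query_py_spec : Claim_equal_template_query_py := by
  intro question context _
  unfold Spec_template_query_py template_query_py template_query_py_alt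
  cases context with
  | none => rfl
  | some ctxList =>
    simp only [pvMiddle_eq]
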